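-- pv_equiv track=rewrite | github.com/PitZhu-2002/stanford-nlp-cs224n | a4_NMT/answer_homework/blew.py | closest_reference_length
-- ===== SOURCE A (Python) =====
-- def closest_reference_length(reference_list, c_len: int) -> int:
--     # 选 |len(r)-len(c)| 最小的 reference，若平局取更短的
--     ref_lens = [len(r.split()) for r in reference_list]
--     best = ref_lens[0]
--     best_diff = abs(best - c_len)
--     for rl in ref_lens[1:]:
--         diff = abs(rl - c_len)
--         if diff < best_diff or (diff == best_diff and rl < best):
--             best = rl
--             best_diff = diff
--     return best
-- ===== SOURCE B (Python) =====
-- def closest_reference_length(reference_list, c_len: int) -> int: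
--     # Two separate reductions: best achievable distance first, then the
--     # shortest length achieving it (matches "closest, ties shorter").
--     ref_lens = [len(r.split()) for r in reference_list]
--     min_diff = min(abs(rl - c_len) for rl in ref_lens)
--     return min(rl for rl in ref_lens if abs(rl - c_len) == min_diff)
-- ===== Notes on version B (the rewrite author's own statement) =====
-- stated objective: simpler
-- what changed: Replaces the interleaved argmin loop carrying (best, best_diff) state with two plain reductions: min of the absolute differences, then min of the lengths attaining that difference.
import Mathlib
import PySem

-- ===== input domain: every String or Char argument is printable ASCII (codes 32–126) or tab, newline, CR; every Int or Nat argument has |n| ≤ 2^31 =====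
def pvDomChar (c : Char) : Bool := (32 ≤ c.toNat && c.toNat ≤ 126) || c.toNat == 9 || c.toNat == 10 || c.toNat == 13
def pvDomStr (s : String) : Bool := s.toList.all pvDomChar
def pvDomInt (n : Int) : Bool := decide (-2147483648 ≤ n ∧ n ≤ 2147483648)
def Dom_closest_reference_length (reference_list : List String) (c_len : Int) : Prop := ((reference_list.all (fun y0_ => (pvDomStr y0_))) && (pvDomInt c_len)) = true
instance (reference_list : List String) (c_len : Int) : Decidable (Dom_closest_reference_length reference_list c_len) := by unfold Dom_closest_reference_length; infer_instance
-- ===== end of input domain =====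

-- B computes the same "closest reference length, ties shorter" in two plain reductions
-- (min difference, then min length attaining it) instead of one interleaved argmin loop (objective: simpler).


-- ===== PORT A =====
-- the loop body of A's for-loop, state = (best, best_diff)
def pvStepA (c_len : Int) (s : Int × Int) (rl : Int) : Int × Int :=
  let diff := |rl - c_len|
  if diff < s.2 ∨ (diff = s.2 ∧ rl < s.1) then (rl, diff) else s

def closest_reference_length (reference_list : List String) (c_len : Int) : Int :=
  let ref_lens := reference_list.map (fun r => ((PySem.Str.split₀ r).length : Int))
  match ref_lens with
  | [] => 0  -- Python: ref_lens[0] raises IndexError; excluded by Pre_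
  | best0 :: rest =>
    (rest.foldl (pvStepA c_len) (best0, |best0 - c_len|)).1

-- ===== PORT B =====
def closest_reference_length_alt (reference_list : List String) (c_len : Int) : Int :=
  let ref_lens := reference_list.map (fun r => ((PySem.Str.split₀ r).length : Int))
  match PySem.List.min? (ref_lens.map (fun rl => |rl - c_len|)) (fun x => x) with
  | none => 0  -- Python: min() of empty raises ValueError; excluded by Pre_
  | some min_diff =>
    match PySem.List.min? (ref_lens.filter (fun rl => |rl - c_len| == min_diff)) (fun x => x) with
    | none => 0  -- unreachable: the filter keeps a witness of min_diff
    | some m => m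

-- ===== PRECONDITION & SPEC =====
-- A raises IndexError (and B ValueError) on an empty reference_list; exactly that is excluded.
def Pre_closest_reference_length (reference_list : List String) (c_len : Int) : Prop := reference_list ≠ []
instance (reference_list : List String) (c_len : Int) : Decidable (Pre_closest_reference_length reference_list c_len) := by unfold Pre_closest_reference_length; infer_instance
def pvWitness_closest_reference_length : List String × Int := (["a b", "c"], 2)
def Spec_closest_reference_length (reference_list : List String) (c_len : Int) (out : Int) : Prop := out = closest_reference_length_alt reference_list c_len
instance (reference_list : List String) (c_len : Int) (out : Int) : Decidable (Spec_closest_reference_length reference_list c_len out) := by unfold Spec_closest_reference_length; infer_instance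

-- ===== CLAIM (what is proved, stated in full; the proofs are below) =====
def Claim_equal_closest_reference_length : Prop := ∀ (reference_list : List String) (c_len : Int), Dom_closest_reference_length reference_list c_len → Pre_closest_reference_length reference_list c_len → Spec_closest_reference_length reference_list c_len (closest_reference_length reference_list c_len)

-- ===== LEMMAS AND PROOFS =====

-- A's fold keeps a pair (a, |a - c|) where a is the lexicographic minimum by key (|x - c|, x).
lemma pvFoldA_inv (c : Int) : ∀ (L : List Int) (b : Int),
    ∃ a, L.foldl (pvStepA c) (b, |b - c|) = (a, |a - c|) ∧ a ∈ b :: L ∧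
      ∀ x ∈ b :: L, |a - c| < |x - c| ∨ (|a - c| = |x - c| ∧ a ≤ x) := by
  intro L
  induction L with
  | nil =>
    intro b
    exact ⟨b, rfl, List.mem_singleton.mpr rfl, by
      intro x hx; rcases List.mem_singleton.mp hx with rfl; right; exact ⟨rfl, le_refl _⟩⟩
  | cons rl t ih =>
    intro b
    have hstep : ∃ b', pvStepA c (b, |b - c|) rl = (b', |b' - c|) ∧ (b' = b ∨ b' = rl) ∧
        (|b' - c| < |b - c| ∨ (|b' - c| = |b - c| ∧ b' ≤ b)) ∧
        (|b' - c| < |rl - c| ∨ (|b' - c| = |rl - c| ∧ b' ≤ rl)) := by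
      unfold pvStepA
      by_cases h : |rl - c| < |b - c| ∨ (|rl - c| = |b - c| ∧ rl < b)
      · refine ⟨rl, by simp [h], Or.inr rfl, ?_, Or.inr ⟨rfl, le_refl _⟩⟩
        rcases h with h | ⟨h1, h2⟩
        · exact Or.inl h
        · exact Or.inr ⟨h1, le_of_lt h2⟩
      · refine ⟨b, by simp [h], Or.inl rfl, Or.inr ⟨rfl, le_refl _⟩, ?_⟩
        push_neg at h
        rcases lt_or_ge (|b - c|) (|rl - c|) with h' | h'
        · exact Or.inl h'
        · have h1 : |rl - c| = |b - c| := le_antisymm h' h.1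
          exact Or.inr ⟨h1.symm, h.2 h1⟩
    rcases hstep with ⟨b', hb', hb'or, hkb, hkrl⟩
    rcases ih b' with ⟨a, ha, hmem, hmin⟩
    refine ⟨a, by simpa [List.foldl_cons, hb'] using ha, ?_, ?_⟩
    · rcases List.mem_cons.mp hmem with rfl | hm
      · rcases hb'or with rfl | rfl
        · exact List.mem_cons_self ..
        · exact List.mem_cons.mpr (Or.inr (List.mem_cons_self ..))
      · exact List.mem_cons.mpr (Or.inr (List.mem_cons.mpr (Or.inr hm)))
    · intro x hx
      have haleb' : |a - c| < |b' - c| ∨ (|a - c| = |b' - c| ∧ a ≤ b') :=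
        hmin b' (List.mem_cons_self ..)
      rcases List.mem_cons.mp hx with rfl | hx
      · rcases haleb' with h | ⟨h1, h2⟩ <;> rcases hkb with h' | ⟨h1', h2'⟩
        · exact Or.inl (lt_trans h h')
        · exact Or.inl (by omega)
        · exact Or.inl (by omega)
        · exact Or.inr ⟨by omega, le_trans h2 h2'⟩
      rcases List.mem_cons.mp hx with rfl | hx
      · rcases haleb' with h | ⟨h1, h2⟩ <;> rcases hkrl with h' | ⟨h1', h2'⟩
        · exact Or.inl (lt_trans h h')
        · exact Or.inl (by omega)
        · exact Or.inl (by omega)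
        · exact Or.inr ⟨by omega, le_trans h2 h2'⟩
      · exact hmin x (List.mem_cons.mpr (Or.inr hx))

-- ===== VERDICT (by name: the statement is the Claim_ definition above) =====
theorem closest_reference_length_spec : Claim_equal_closest_reference_length := by
  intro reference_list c_len _ hpre
  obtain ⟨r0, rtl, rfl⟩ := List.exists_cons_of_ne_nil hpre
  unfold Spec_closest_reference_length closest_reference_length closest_reference_length_alt
  simp only [List.map_cons]
  set b0 : Int := ((PySem.Str.split₀ r0).length : Int) with hb0
  set rest : List Int := rtl.map (fun r => ((PySem.Str.split₀ r).length : Int)) with hrest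
  rcases pvFoldA_inv c_len rest b0 with ⟨a, ha, hamem, hamin⟩
  -- min? of the diffs is some d, and d = |a - c_len|
  obtain ⟨d, hd⟩ : ∃ d, PySem.List.min? ((b0 :: rest).map (fun rl => |rl - c_len|)) (fun x => x) = some d := by
    cases h : PySem.List.min? ((b0 :: rest).map (fun rl => |rl - c_len|)) (fun x => x) with
    | none => exact absurd ((PySem.List.min?_eq_none_iff _ _).mp h) (by simp)
    | some d => exact ⟨d, rfl⟩
  have hdmin := PySem.List.min?_isMin hd
  obtain ⟨y, hy, hyd⟩ := List.mem_map.mp (PySem.List.min?_mem hd)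
  have hda : d = |a - c_len| := by
    have h1 : d ≤ |a - c_len| := hdmin _ (List.mem_map_of_mem hamem)
    have h2 : |a - c_len| ≤ |y - c_len| := by
      rcases hamin y hy with h | ⟨h, _⟩ <;> omega
    omega
  -- the filter contains a, so its min? is some m, with m in the list and |m - c_len| = d
  have hafil : a ∈ (b0 :: rest).filter (fun rl => |rl - c_len| == d) :=
    List.mem_filter.mpr ⟨hamem, by simp [hda]⟩
  obtain ⟨m, hm⟩ : ∃ m, PySem.List.min? ((b0 :: rest).filter (fun rl => |rl - c_len| == d)) (fun x => x) = some m := by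
    cases h : PySem.List.min? ((b0 :: rest).filter (fun rl => |rl - c_len| == d)) (fun x => x) with
    | none => exact absurd ((PySem.List.min?_eq_none_iff _ _).mp h ▸ hafil) (List.not_mem_nil)
    | some m => exact ⟨m, rfl⟩
  have hmfil := List.mem_filter.mp (PySem.List.min?_mem hm)
  have hmd : |m - c_len| = d := by simpa using hmfil.2
  -- a = m by antisymmetry of the two minimality facts
  have h1 : m ≤ a := PySem.List.min?_isMin hm _ hafil
  have h2 : a ≤ m := by
    rcases hamin m hmfil.1 with h | ⟨_, h⟩ <;> omega
  have hmc : (|b0 - c_len| :: rest.map (fun rl => |rl - c_len|)) = (b0 :: rest).map (fun rl => |rl - c_len|) := rfl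
  rw [hmc]
  simp only [hd, hm, ha]
  exact le_antisymm h2 h1
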